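-- pv_equiv track=rewrite | github.com/ChrisEarman/SQLDataBaseViewer | queryParser.py | preKeyWords
-- ===== SOURCE A (Python) =====
-- def preKeyWords(queryList):
-- 	sqlKeys = ['from','where']
-- 	capIndex = len(queryList)
-- 	queryListLower = []
-- 	for string in queryList:
-- 		queryListLower.append(string.lower())
-- 	for key in sqlKeys:
-- 		try:
-- 			newIndex = queryListLower.index(key)
-- 			if newIndex < capIndex:
-- 					capIndex = newIndex
-- 		except:
-- 			pass
-- 	return queryList[:capIndex]
-- ===== SOURCE B (Python) =====
-- def preKeyWords(queryList):
--     lowered = [s.lower() for s in queryList]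
--     cut = next((i for i, s in enumerate(lowered) if s in ('from', 'where')), len(queryList))
--     return queryList[:cut]
-- ===== Notes on version B (the rewrite author's own statement) =====
-- stated objective: simpler
-- what changed: Replaces the appending loop plus two repeated .index scans combined with min by a lowercasing comprehension and a single early-stopping enumerate scan for the first keyword.
import Mathlib
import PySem

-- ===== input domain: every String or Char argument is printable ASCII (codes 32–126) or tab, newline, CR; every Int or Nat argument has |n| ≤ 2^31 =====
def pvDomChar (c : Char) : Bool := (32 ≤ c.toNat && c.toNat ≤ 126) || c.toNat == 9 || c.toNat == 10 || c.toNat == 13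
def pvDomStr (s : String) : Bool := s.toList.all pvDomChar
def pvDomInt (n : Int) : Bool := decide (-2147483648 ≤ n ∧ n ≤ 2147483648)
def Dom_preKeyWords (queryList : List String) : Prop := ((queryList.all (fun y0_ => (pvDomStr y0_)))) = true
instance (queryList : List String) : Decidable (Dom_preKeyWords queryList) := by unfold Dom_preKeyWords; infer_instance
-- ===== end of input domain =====

-- B replaces A's appending loop plus two repeated .index scans combined via min by a
-- lowercasing comprehension and a single enumerate scan for the first keyword (objective: simpler).

-- ===== PORT A =====
-- literal port of A: build the lowered list by appending in a loop, then for each key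
-- try .index (none = ValueError, caught by A's bare except → pass) and keep the minimum.
def preKeyWords (queryList : List String) : List String :=
  let sqlKeys : List String := ["from", "where"]
  let capIndex : Nat := queryList.length
  let queryListLower : List String :=
    queryList.foldl (fun acc s => acc ++ [PySem.Str.lower s]) []
  let capIndex : Nat :=
    sqlKeys.foldl (fun cap key =>
      match PySem.List.index? queryListLower key with
      | some newIndex => if newIndex < cap then newIndex else cap
      | none => cap) capIndex
  PySem.List.slice queryList none (some (Int.ofNat capIndex))

-- ===== PORT B =====
-- port of B: lowercase via map (the comprehension), then one enumerate/find? scan.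
def preKeyWords_alt (queryList : List String) : List String :=
  let lowered : List String := queryList.map PySem.Str.lower
  let cut : Nat :=
    match (PySem.List.enumerate lowered).find? (fun p => p.2 == "from" || p.2 == "where") with
    | some (i, _) => i.toNat
    | none => queryList.length
  PySem.List.slice queryList none (some (Int.ofNat cut))

-- ===== PRECONDITION & SPEC =====
def Spec_preKeyWords (queryList : List String) (out : List String) : Prop := out = preKeyWords_alt queryList
instance (queryList : List String) (out : List String) : Decidable (Spec_preKeyWords queryList out) := by unfold Spec_preKeyWords; infer_instance

-- ===== CLAIM (what is proved, stated in full; the proofs are below) =====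
def Claim_equal_preKeyWords : Prop := ∀ (queryList : List String), Dom_preKeyWords queryList → Spec_preKeyWords queryList (preKeyWords queryList)

-- ===== LEMMAS AND PROOFS =====

theorem pv_foldl_append_map (f : String → String) (l : List String) (acc : List String) :
    l.foldl (fun a s => a ++ [f s]) acc = acc ++ l.map f := by
  induction l generalizing acc with
  | nil => simp
  | cons x xs ih => simp [List.foldl, ih]

-- A's two-key min-of-.index fold computes the first index of a keyword (length if none).
theorem pvIfMin (a b : Nat) : (if a < b then a else b) = min a b := by
  rw [Nat.min_def]; split_ifs <;> omega
set_option maxHeartbeats 1000000 in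
theorem pv_capA_eq (L : List String) :
    (["from", "where"] : List String).foldl (fun cap key =>
        match PySem.List.index? L key with
        | some newIndex => if newIndex < cap then newIndex else cap
        | none => cap) L.length
      = L.findIdx (fun s => s == "from" || s == "where") := by
  induction L with
  | nil => decide
  | cons x xs ih =>
    simp only [List.foldl, PySem.List.index?_eq_idxOf?] at ih ⊢
    rw [List.idxOf?_cons, List.idxOf?_cons, List.findIdx_cons]
    by_cases hf : x = "from" <;> by_cases hw : x = "where"
    · exact absurd (hf ▸ hw) (by simp)
    · subst hf
      rcases h : List.idxOf? "where" xs with _ | j <;> simp [h] <;> omega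
    · subst hw
      rcases h : List.idxOf? "from" xs with _ | i <;> simp [h] <;> omega
    · have hf' : (x == "from") = false := by simpa using hf
      have hw' : (x == "where") = false := by simpa using hw
      rcases h1 : List.idxOf? "from" xs with _ | i <;>
        rcases h2 : List.idxOf? "where" xs with _ | j <;>
          simp only [h1, h2, hf', hw', Option.map_some, Option.map_none, Bool.false_eq_true,
            if_false, List.length_cons, List.findIdx_cons, Bool.or_self, cond_false,
            pvIfMin, Nat.succ_min_succ, min_add_add_right] at ih ⊢ <;>
        exact congrArg (fun t => t + 1) ih

-- B's single enumerate/find? scan computes the same first index, for any start offset.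
theorem pv_cutB_eq (L : List String) (s : Nat) :
    (match (PySem.List.enumerate L (s : Int)).find? (fun p => p.2 == "from" || p.2 == "where") with
     | some (i, _) => i.toNat
     | none => s + L.length)
      = s + L.findIdx (fun x => x == "from" || x == "where") := by
  induction L generalizing s with
  | nil => simp [PySem.List.enumerate_nil]
  | cons x xs ih =>
    rw [PySem.List.enumerate_cons]
    by_cases hx : (x == "from" || x == "where") = true
    · simp [List.find?_cons, hx, List.findIdx_cons]
    · have hb : (x == "from" || x == "where") = false := by
        simp only [Bool.not_eq_true] at hx; exact hx
      have hcast : (s : Int) + 1 = ((s + 1 : Nat) : Int) := by push_cast; ring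
      simp only [List.find?_cons, List.findIdx_cons, hb, cond_false, List.length_cons, hcast]
      rw [show s + (xs.length + 1) = (s + 1) + xs.length by omega, ih (s + 1)]
      omega

-- ===== VERDICT (by name: the statement is the Claim_ definition above) =====
theorem preKeyWords_spec : Claim_equal_preKeyWords := by
  intro l _
  show preKeyWords l = preKeyWords_alt l
  simp only [preKeyWords, preKeyWords_alt, pv_foldl_append_map, List.nil_append]
  have hlen : l.length = (l.map PySem.Str.lower).length := by simp
  rw [hlen, pv_capA_eq]
  have := pv_cutB_eq (l.map PySem.Str.lower) 0
  simp only [Nat.cast_zero, Nat.zero_add] at this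
  rw [this]
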